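-- pv_equiv track=rewrite | github.com/gregdferrell/algo | problems/reverse_and_collapse_string.py | reverse_and_collapse
-- ===== SOURCE A (Python) =====
-- def reverse_and_collapse(in_str: str) -> str:
-- 	"""
-- 	Solution: Iterate backwards and copy chars to a new string if they don't equal the last char of that new string.
-- 		Time: O(n) -> Iterate every char
-- 		Space: O(n) -> Construct another string with max size = length of input string
-- 	"""
-- 	if not in_str:
-- 		raise ValueError('input string must not be empty')
--
-- 	out_str = ''
--
-- 	# Get indexes in reverse
-- 	for i in range(len(in_str)-1, -1, -1):
-- 		# If out_str last char doesn't match this one, add it to the end of out_str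
-- 		if not out_str or out_str[-1] != in_str[i]:
-- 			out_str += in_str[i]
--
-- 	return out_str
-- ===== SOURCE B (Python) =====
-- def reverse_and_collapse(in_str: str) -> str:
-- 	"""
-- 	Run-skipping scan: walk FORWARD over the input with a pointer that jumps
-- 	over each maximal run of equal characters, collecting one representative
-- 	per run; the answer is the collected representatives reversed at the end.
-- 	Correct because collapsing commutes with reversal (runs map to runs).
-- 	"""
-- 	if not in_str:
-- 		raise ValueError('input string must not be empty')
--
-- 	pieces = []
-- 	i = 0
-- 	n = len(in_str)
-- 	while i < n:
-- 		c = in_str[i]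
-- 		# skip the whole run of c
-- 		while i < n and in_str[i] == c:
-- 			i += 1
-- 		pieces.append(c)
-- 	return ''.join(reversed(pieces))
-- ===== Notes on version B (the rewrite author's own statement) =====
-- stated objective: alternative
-- what changed: A builds the result in one backward index loop, appending each char unless it equals the growing output's last char; B scans forward with a run-skipping pointer (an inner while jumps past each maximal run), collects one representative per run, and reverses the collected pieces at the end.
import Mathlib
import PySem

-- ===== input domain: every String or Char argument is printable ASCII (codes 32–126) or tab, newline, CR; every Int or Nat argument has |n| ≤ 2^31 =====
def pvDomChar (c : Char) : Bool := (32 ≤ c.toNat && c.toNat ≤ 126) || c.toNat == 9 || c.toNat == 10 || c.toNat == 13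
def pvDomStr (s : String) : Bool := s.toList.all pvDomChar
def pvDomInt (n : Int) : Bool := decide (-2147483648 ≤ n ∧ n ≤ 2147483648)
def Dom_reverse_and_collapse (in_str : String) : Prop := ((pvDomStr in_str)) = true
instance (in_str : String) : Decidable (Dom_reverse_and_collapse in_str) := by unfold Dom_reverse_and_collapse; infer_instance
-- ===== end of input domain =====

-- B scans FORWARD with a run-skipping pointer (an inner while jumps over each maximal run,
-- collecting one representative per run) and reverses the collected pieces at the end,
-- instead of A's single backward index loop comparing each char with the output's last char
-- (alternative; same asymptotic cost).

-- ===== PORT A =====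
-- Backward index loop; in_str[i] is always in range here, so pyGetD's default is unreachable.
def reverse_and_collapse (in_str : String) : String :=
  let cs := in_str.toList
  let out := (PySem.List.pyRange ((cs.length : Int) - 1) (-1) (-1)).foldl
    (fun out i =>
      if out = [] ∨ PySem.List.pyGet? out (-1) ≠ some (PySem.List.pyGetD cs i 'a')
      then out ++ [PySem.List.pyGetD cs i 'a'] else out) []
  String.ofList out

-- ===== PORT B =====
-- Inner while of Source B: 'while i < n and in_str[i] == c: i += 1'. The index i only ever
-- starts at 0 and increments, so it is carried as a Nat; in_str[i] is only read with
-- i < n, so List.getD's default is unreachable.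
def pvSkip (cs : List Char) (n : Nat) (c : Char) (i : Nat) : Nat :=
  if i < n ∧ cs.getD i 'a' = c then pvSkip cs n c (i + 1) else i
termination_by n - i
decreasing_by omega

-- the port of B's outer while loop cites this fact in decreasing_by
theorem pvSkip_ge (cs : List Char) (n : Nat) (c : Char) (i : Nat) : i ≤ pvSkip cs n c i := by
  fun_induction pvSkip cs n c i with
  | case1 i h ih => omega
  | case2 i h => omega

-- Outer while of Source B: collect one representative per run into pieces, jumping with pvSkip.
def pvOuter (cs : List Char) (n : Nat) (i : Nat) (pieces : List Char) : List Char :=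
  if h : i < n then
    pvOuter cs n (pvSkip cs n (cs.getD i 'a') i) (pieces ++ [cs.getD i 'a'])
  else pieces
termination_by n - i
decreasing_by
  have h1 : pvSkip cs n (cs.getD i 'a') i = pvSkip cs n (cs.getD i 'a') (i + 1) := by
    rw [pvSkip]; simp [h]
  have h2 := pvSkip_ge cs n (cs.getD i 'a') (i + 1)
  omega

-- ''.join(reversed(pieces)); B raises ValueError on "" (outside Pre_), the port returns "".
def reverse_and_collapse_alt (in_str : String) : String :=
  let cs := in_str.toList
  String.ofList ((pvOuter cs cs.length 0 []).reverse)

-- ===== PRECONDITION & SPEC =====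
-- Python A raises ValueError on the empty string; Pre_ excludes exactly that input.
def Pre_reverse_and_collapse (in_str : String) : Prop := in_str ≠ ""
instance (in_str : String) : Decidable (Pre_reverse_and_collapse in_str) := by
  unfold Pre_reverse_and_collapse; infer_instance

def pvWitness_reverse_and_collapse : String := "abba"

def Spec_reverse_and_collapse (in_str : String) (out : String) : Prop := out = reverse_and_collapse_alt in_str
instance (in_str : String) (out : String) : Decidable (Spec_reverse_and_collapse in_str out) := by unfold Spec_reverse_and_collapse; infer_instance

-- ===== CLAIM (what is proved, stated in full; the proofs are below) =====
def Claim_equal_reverse_and_collapse : Prop := ∀ (in_str : String), Dom_reverse_and_collapse in_str → Pre_reverse_and_collapse in_str → Spec_reverse_and_collapse in_str (reverse_and_collapse in_str)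

-- ===== LEMMAS AND PROOFS =====

-- Canonical collapse: first char of every maximal run.
def pvG : List Char → List Char
  | [] => []
  | a :: t => a :: pvG (t.dropWhile (· == a))
termination_by l => l.length
decreasing_by
  have := List.length_dropWhile_le (· == a) t
  simp; omega

theorem pvG_nil : pvG [] = [] := by rw [pvG]

theorem pvG_cons (a : Char) (t : List Char) :
    pvG (a :: t) = a :: pvG (t.dropWhile (· == a)) := by rw [pvG]

-- A's loop step, after pulling the character lookup out of the index loop.
def pvStep (out : List Char) (c : Char) : List Char :=
  if out = [] ∨ PySem.List.pyGet? out (-1) ≠ some c then out ++ [c] else out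

-- Invariant for A: once nonempty, the accumulator's last char is the last processed char.
theorem pvStep_foldl (t : List Char) (p : Char) (init : List Char) :
    t.foldl pvStep (init ++ [p]) =
      init ++ p :: (((p :: t).zip t).filter (fun pc => pc.2 != pc.1)).map (·.2) := by
  induction t generalizing p init with
  | nil => simp
  | cons c t' ih =>
    by_cases h : c = p
    · subst h
      have : pvStep (init ++ [c]) c = init ++ [c] := by
        simp [pvStep, PySem.List.pyGet?_neg_one_append_singleton]
      simp only [List.foldl_cons, this, ih c init, List.zip_cons_cons, List.filter_cons]
      simp
    · have hstep : pvStep (init ++ [p]) c = (init ++ [p]) ++ [c] := by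
        simp [pvStep, PySem.List.pyGet?_neg_one_append_singleton]
        exact fun hh => h hh.symm
      have := ih c (init ++ [p])
      simp only [List.foldl_cons, hstep, this, List.zip_cons_cons, List.filter_cons]
      simp [h]

-- A's zip-with-shift characterisation is pvG's tail.
theorem pvZip_eq_pvG (t : List Char) (a : Char) :
    (((a :: t).zip t).filter (fun pc => pc.2 != pc.1)).map (·.2) =
      pvG (t.dropWhile (· == a)) := by
  induction t generalizing a with
  | nil => simp [pvG_nil]
  | cons b t' ih =>
    by_cases h : b = a
    · subst h
      simp only [List.zip_cons_cons, List.filter_cons, List.dropWhile_cons]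
      simp [ih b]
    · have hba : (b == a) = false := by simp [h]
      have hc : (fun pc : Char × Char => pc.2 != pc.1) (a, b) = true := by simp [h]
      simp only [List.zip_cons_cons, List.filter_cons, hc, if_true, List.map_cons,
        List.dropWhile_cons, hba, Bool.false_eq_true, if_false, pvG_cons, ih b]

-- pvG of a run of a's is [a].
theorem pvG_replicate (a : Char) (m : Nat) : pvG (a :: List.replicate m a) = [a] := by
  rw [pvG_cons]
  have h : (List.replicate m a).dropWhile (· == a) = [] := by
    rw [List.dropWhile_eq_nil_iff]
    intro x hx
    simp [List.eq_of_mem_replicate hx]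
  rw [h, pvG_nil]

-- Appending a trailing run of a's (not continuing l's last run) appends one a to pvG.
theorem pvG_append_run (a : Char) (m : Nat) (l : List Char) (hl : l.getLast? ≠ some a) :
    pvG (l ++ a :: List.replicate m a) = pvG l ++ [a] := by
  fun_induction pvG l with
  | case1 => simpa [pvG_nil] using pvG_replicate a m
  | case2 b t ih =>
    rcases eq_or_ne (t.dropWhile (· == b)) [] with hnil | hne
    · have hall : ∀ x ∈ t, x = b := by
        intro x hx
        simpa using List.dropWhile_eq_nil_iff.1 hnil x hx
      have hlastb : (b :: t).getLast? = some b := by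
        have hne' : (b :: t) ≠ [] := by simp
        rw [List.getLast?_eq_some_getLast hne']
        have hmem := List.getLast_mem hne'
        rcases List.mem_cons.mp hmem with hh | hh
        · rw [hh]
        · rw [hall _ hh]
      have hb : b ≠ a := by
        intro hba
        exact hl (by rw [hlastb, hba])
      have hdrop : (t ++ a :: List.replicate m a).dropWhile (· == b) = a :: List.replicate m a := by
        rw [List.dropWhile_append]
        simp [hnil, Ne.symm hb]
      rw [List.cons_append, pvG_cons, hdrop, pvG_replicate, hnil, pvG_nil]
      simp
    · have htne : t ≠ [] := by
        rintro rfl; simp at hne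
      have h1 : (t.dropWhile (· == b)).getLast? = t.getLast? := by
        obtain ⟨pre, hpre⟩ := List.dropWhile_suffix (l := t) (· == b)
        conv_rhs => rw [← hpre]
        rw [List.getLast?_append_of_ne_nil _ hne]
      have hlast : (t.dropWhile (· == b)).getLast? ≠ some a := by
        rw [h1]
        obtain ⟨c, t2, rfl⟩ := List.exists_cons_of_ne_nil htne
        simpa [List.getLast?_cons_cons] using hl
      have hdrop : (t ++ a :: List.replicate m a).dropWhile (· == b) =
          t.dropWhile (· == b) ++ a :: List.replicate m a := by
        rw [List.dropWhile_append]
        simp [hne]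
      rw [List.cons_append, pvG_cons, hdrop, ih hlast]
      simp

-- Collapsing commutes with reversal: runs map to runs.
theorem pvG_reverse (l : List Char) : pvG l.reverse = (pvG l).reverse := by
  fun_induction pvG l with
  | case1 => simp [pvG_nil]
  | case2 a t ih =>
    have hk : t.takeWhile (· == a) = List.replicate (t.takeWhile (· == a)).length a := by
      apply List.eq_replicate_of_mem
      intro x hx
      simpa using List.mem_takeWhile_imp hx
    have hsplit : (a :: t).reverse =
        (t.dropWhile (· == a)).reverse ++ a :: List.replicate (t.takeWhile (· == a)).length a := by
      conv_lhs => rw [← List.takeWhile_append_dropWhile (p := (· == a)) (l := t)]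
      rw [List.reverse_cons, List.reverse_append, List.append_assoc]
      congr 1
      rw [hk, List.reverse_replicate, ← List.replicate_succ', List.replicate_succ]
      simp
    have hlast : ((t.dropWhile (· == a)).reverse).getLast? ≠ some a := by
      rw [List.getLast?_reverse]
      rcases eq_or_ne (t.dropWhile (· == a)) [] with hnil | hne
      · simp [hnil]
      · have hhead := List.head_dropWhile_not (· == a) (l := t) hne
        intro hcontra
        rw [List.head?_eq_some_head hne] at hcontra
        have := Option.some.inj hcontra
        simp [this] at hhead
    rw [hsplit, pvG_append_run a _ _ hlast, ih, List.reverse_cons]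

-- B's inner while lands exactly past the current run.
theorem pvSkip_drop (cs : List Char) (n : Nat) (c : Char) (i : Nat) (hn : n = cs.length) :
    cs.drop (pvSkip cs n c i) = (cs.drop i).dropWhile (· == c) := by
  fun_induction pvSkip cs n c i with
  | case1 i h ih =>
    obtain ⟨hi, hc⟩ := h
    have hget : cs.getD i 'a' = cs[i]'(by omega) := List.getD_eq_getElem cs 'a' (by omega)
    have hdrop : cs.drop i = cs[i]'(by omega) :: cs.drop (i + 1) := by
      rw [List.drop_eq_getElem_cons (by omega)]
    rw [ih, hdrop, List.dropWhile_cons]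
    rw [hget] at hc
    simp [hc]
  | case2 i h =>
    rcases Nat.lt_or_ge i n with hi | hi
    · have hc : cs.getD i 'a' ≠ c := fun hc => h ⟨hi, hc⟩
      have hget : cs.getD i 'a' = cs[i]'(by omega) := List.getD_eq_getElem cs 'a' (by omega)
      have hdrop : cs.drop i = cs[i]'(by omega) :: cs.drop (i + 1) := by
        rw [List.drop_eq_getElem_cons (by omega)]
      rw [hget] at hc
      rw [hdrop, List.dropWhile_cons]
      simp [hc]
    · have hd : cs.drop i = [] := List.drop_eq_nil_of_le (by omega)
      simp [hd]

-- B's outer while computes pvG of the unprocessed suffix.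
theorem pvOuter_eq (cs : List Char) (n : Nat) (i : Nat) (pieces : List Char) (hn : n = cs.length) :
    pvOuter cs n i pieces = pieces ++ pvG (cs.drop i) := by
  fun_induction pvOuter cs n i pieces with
  | case1 i pieces h ih =>
    have hget : cs.getD i 'a' = cs[i]'(by omega) := List.getD_eq_getElem cs 'a' (by omega)
    have hdrop : cs.drop i = cs[i]'(by omega) :: cs.drop (i + 1) := by
      rw [List.drop_eq_getElem_cons (by omega)]
    rw [ih, pvSkip_drop cs n _ i hn, hdrop, pvG_cons]
    rw [List.dropWhile_cons]
    have hsome : cs[i]? = some (cs[i]'(by omega)) := List.getElem?_eq_getElem (by omega)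
    simp [List.getD, hsome, List.append_assoc]
  | case2 i pieces h =>
    have : cs.drop i = [] := List.drop_eq_nil_of_le (by omega)
    simp [this, pvG_nil]

-- ===== VERDICT (by name: the statement is the Claim_ definition above) =====
theorem reverse_and_collapse_spec : Claim_equal_reverse_and_collapse := by
  intro in_str _ hpre
  unfold Spec_reverse_and_collapse reverse_and_collapse reverse_and_collapse_alt
  have hA : (PySem.List.pyRange ((in_str.toList.length : Int) - 1) (-1) (-1)).foldl
      (fun out i =>
        if out = [] ∨ PySem.List.pyGet? out (-1) ≠ some (PySem.List.pyGetD in_str.toList i 'a')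
        then out ++ [PySem.List.pyGetD in_str.toList i 'a'] else out) [] =
      in_str.toList.reverse.foldl pvStep [] := by
    have hr : PySem.List.pyRange ((in_str.toList.length : Int) - 1) (-1) (-1) =
        (PySem.List.pyRange 0 (in_str.toList.length : Int) 1).reverse := by
      rw [PySem.List.pyRange_neg_one_eq_reverse]; norm_num
    rw [hr]
    rw [show (fun (out : List Char) (i : Int) =>
        if out = [] ∨ PySem.List.pyGet? out (-1) ≠ some (PySem.List.pyGetD in_str.toList i 'a')
        then out ++ [PySem.List.pyGetD in_str.toList i 'a'] else out) =
        (fun out i => pvStep out (PySem.List.pyGetD in_str.toList i 'a')) from rfl]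
    rw [← List.foldl_map]
    rw [List.map_reverse, PySem.List.map_pyGetD_pyRange_zero']
  simp only [hA]
  have hne : in_str.toList.reverse ≠ [] := by
    simp only [ne_eq, List.reverse_eq_nil_iff]
    intro hc
    exact hpre (String.toList_inj.mp (by simpa using hc))
  obtain ⟨a, t, hrev⟩ := List.exists_cons_of_ne_nil hne
  rw [hrev]
  have h0 : pvStep [] a = [] ++ [a] := by simp [pvStep]
  rw [List.foldl_cons, h0, pvStep_foldl t a []]
  rw [List.nil_append, pvZip_eq_pvG t a]
  have hArun : (a :: pvG (t.dropWhile (· == a))) = pvG in_str.toList.reverse := by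
    rw [hrev, pvG_cons]
  rw [hArun, pvG_reverse]
  rw [pvOuter_eq in_str.toList _ 0 [] rfl]
  simp
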